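-- pv_equiv track=rewrite | github.com/pypi-data/pypi-mirror-260 | packages/truera/truera-12.6.1-py3-none-any.whl/truera/client/nn/explain/psys.py | _val_summary
-- ===== SOURCE A (Python) =====
-- from typing import Any, Callable, DefaultDict, Dict, Iterable, List
--
-- def _val_summary(val: Any, max_len: int = 32) -> str:
--     str_val = str(val)
--
--     if "\n" in str_val:
--         lines = str_val.split("\n")
--
--         str_val = lines[0]
--         while str_val == "" and len(lines) > 1:
--             lines = lines[1:]
--             str_val = lines[0]
--
--         if len(lines) > 1:
--             str_val += "..."
--
--     if len(str_val) > max_len: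
--         str_val = str_val[0:max_len - 2] + "..."
--
--     return str_val
-- ===== SOURCE B (Python) =====
-- def _val_summary(val, max_len: int = 32) -> str:
--     str_val = str(val)
--     trimmed = str_val.lstrip('\n')
--     head, sep, _tail = trimmed.partition('\n')
--     str_val = head + '...' if sep else head
--     if len(str_val) > max_len:
--         str_val = str_val[0:max_len - 2] + '...'
--     return str_val
-- ===== Notes on version B (the rewrite author's own statement) =====
-- stated objective: simpler
-- what changed: A splits the string into a list of lines and runs a while loop slicing off leading empty lines; B instead left-strips leading newlines and partitions once at the first remaining newline, building no line list and running no loop.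
import Mathlib
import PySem

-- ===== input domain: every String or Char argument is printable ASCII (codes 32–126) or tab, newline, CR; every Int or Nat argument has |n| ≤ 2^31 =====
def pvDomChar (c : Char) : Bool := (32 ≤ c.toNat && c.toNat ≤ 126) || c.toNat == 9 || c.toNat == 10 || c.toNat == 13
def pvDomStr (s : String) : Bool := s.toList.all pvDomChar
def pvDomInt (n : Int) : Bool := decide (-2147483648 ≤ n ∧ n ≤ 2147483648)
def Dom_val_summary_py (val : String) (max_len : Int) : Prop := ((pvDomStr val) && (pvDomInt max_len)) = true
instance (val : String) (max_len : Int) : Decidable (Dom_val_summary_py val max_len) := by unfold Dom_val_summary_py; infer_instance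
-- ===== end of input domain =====

-- B replaces A's split + while-slice loop by lstrip('\n') and partition('\n'): simpler decomposition, same value everywhere.

-- ===== PORT A =====
-- the while-loop 'while str_val == "" and len(lines) > 1: lines = lines[1:]; str_val = lines[0]' on state (lines, str_val = lines[0])
def aLoopA : List (List Char) → List (List Char)
  | x :: y :: rest => if x = [] then aLoopA (y :: rest) else x :: y :: rest
  | l => l

def val_summary_py (val : String) (max_len : Int) : String :=
  let sv := val.toList                        -- str(val): val is already a string
  let sv1 :=
    if PySem.Chars.isIn ['\n'] sv then
      let lines := PySem.Chars.splitOn sv ['\n']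
      let lines1 := aLoopA lines              -- the while loop (str_val stays lines[0])
      let s := lines1.headD []                -- lines[0] (split never returns [], so headD is exact)
      if 1 < lines1.length then s ++ ['.', '.', '.'] else s
    else sv
  String.ofList
    (if max_len < PySem.Chars.len sv1 then
       PySem.Chars.slice sv1 (some 0) (some (max_len - 2)) ++ ['.', '.', '.']
     else sv1)

-- ===== PORT B =====
def val_summary_py_alt (val : String) (max_len : Int) : String :=
  let trimmed := val.toList.dropWhile (· == '\n')    -- str_val.lstrip('\n'): exact, drops leading '\n'
  -- partition('\n'): head = text before the first '\n'; 'if sep' is truthy iff '\n' occurs (exact)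
  let head := trimmed.takeWhile (· != '\n')
  let sep := trimmed.any (· == '\n')
  let sv := if sep then head ++ ['.', '.', '.'] else head
  String.ofList
    (if max_len < PySem.Chars.len sv then
       PySem.Chars.slice sv (some 0) (some (max_len - 2)) ++ ['.', '.', '.']
     else sv)

-- ===== PRECONDITION & SPEC =====
def Spec_val_summary_py (val : String) (max_len : Int) (out : String) : Prop := out = val_summary_py_alt val max_len
instance (val : String) (max_len : Int) (out : String) : Decidable (Spec_val_summary_py val max_len out) := by unfold Spec_val_summary_py; infer_instance

-- ===== CLAIM (what is proved, stated in full; the proofs are below) =====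
def Claim_equal_val_summary_py : Prop := ∀ (val : String) (max_len : Int), Dom_val_summary_py val max_len → Spec_val_summary_py val max_len (val_summary_py val max_len)

-- ===== LEMMAS AND PROOFS =====

-- structural model of s.split('\n') (Python split with a one-char separator)
def splitNl : List Char → List (List Char)
  | [] => [[]]
  | c :: r =>
    if c = '\n' then [] :: splitNl r
    else
      match splitNl r with
      | [] => [[c]]        -- unreachable: splitNl is never []
      | h :: t => (c :: h) :: t

theorem splitNl_ne_nil (s : List Char) : splitNl s ≠ [] := by
  cases s with
  | nil => simp [splitNl]
  | cons c r =>
    simp only [splitNl]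
    split_ifs
    · simp
    · cases h : splitNl r <;> simp

theorem splitOn_go_spec : ∀ (fuel : Nat) (l cur : List Char) (acc : List (List Char)),
    l.length ≤ fuel →
    PySem.Chars.splitOn.go ['\n'] fuel l cur acc =
      acc.reverse ++
        (match splitNl l with
         | [] => [cur.reverse]
         | h :: t => (cur.reverse ++ h) :: t) := by
  intro fuel
  induction fuel with
  | zero =>
    intro l cur acc hl
    have : l = [] := List.length_eq_zero_iff.mp (Nat.le_zero.mp hl)
    subst this
    simp [PySem.Chars.splitOn.go, splitNl]
  | succ n ih =>
    intro l cur acc hl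
    cases l with
    | nil => simp [PySem.Chars.splitOn.go, splitNl]
    | cons c rest =>
      by_cases hc : c = '\n'
      · subst hc
        have hpre : List.isPrefixOf ['\n'] ('\n' :: rest) = true := by
          simp [List.isPrefixOf]
        rw [show PySem.Chars.splitOn.go ['\n'] (n+1) ('\n' :: rest) cur acc =
              PySem.Chars.splitOn.go ['\n'] n (List.drop (List.length ['\n']) ('\n' :: rest)) [] (cur.reverse :: acc) by
              simp [PySem.Chars.splitOn.go, hpre]]
        simp only [List.length_cons, List.length_nil, Nat.zero_add, List.drop_succ_cons, List.drop_zero]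
        rw [ih rest [] (cur.reverse :: acc) (by simpa using hl)]
        cases h : splitNl rest with
        | nil => exact absurd h (splitNl_ne_nil rest)
        | cons h0 t => simp [splitNl, h]
      · have hpre : List.isPrefixOf ['\n'] (c :: rest) = false := by
          simp [List.isPrefixOf]
          intro h; exact absurd h.symm hc
        rw [show PySem.Chars.splitOn.go ['\n'] (n+1) (c :: rest) cur acc =
              PySem.Chars.splitOn.go ['\n'] n rest (c :: cur) acc by
              simp [PySem.Chars.splitOn.go, hpre]]
        rw [ih rest (c :: cur) acc (by simpa using hl)]
        cases h : splitNl rest with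
        | nil => exact absurd h (splitNl_ne_nil rest)
        | cons h0 t => simp [splitNl, h, hc]

theorem splitOn_eq_splitNl (s : List Char) :
    PySem.Chars.splitOn s ['\n'] = splitNl s := by
  unfold PySem.Chars.splitOn
  rw [splitOn_go_spec (s.length + 1) s [] [] (by omega)]
  cases h : splitNl s with
  | nil => exact absurd h (splitNl_ne_nil s)
  | cons h0 t => simp

theorem splitNl_headD (s : List Char) :
    (splitNl s).headD [] = s.takeWhile (· != '\n') := by
  induction s with
  | nil => simp [splitNl]
  | cons c r ih =>
    by_cases hc : c = '\n'
    · subst hc; simp [splitNl, List.takeWhile]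
    · simp only [splitNl, if_neg hc]
      cases h : splitNl r with
      | nil => exact absurd h (splitNl_ne_nil r)
      | cons h0 t =>
        rw [h] at ih
        simp only [List.headD_cons] at ih ⊢
        have hcb : (c != '\n') = true := by simp [hc]
        simp [List.takeWhile, hcb, ih]

theorem splitNl_len (s : List Char) :
    1 < (splitNl s).length ↔ '\n' ∈ s := by
  induction s with
  | nil => simp [splitNl]
  | cons c r ih =>
    by_cases hc : c = '\n'
    · subst hc
      have := List.length_pos_iff.mpr (splitNl_ne_nil r)
      simp [splitNl]; omega
    · simp only [splitNl, if_neg hc]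
      cases h : splitNl r with
      | nil => exact absurd h (splitNl_ne_nil r)
      | cons h0 t =>
        rw [h] at ih
        simp only [List.length_cons] at ih ⊢
        constructor
        · intro hlt; exact List.mem_cons_of_mem _ (ih.mp hlt)
        · intro h1
          cases List.mem_cons.mp h1 with
          | inl he => exact absurd he.symm hc
          | inr hm => exact ih.mpr hm

theorem aLoopA_cons_ne (x : List Char) (L : List (List Char)) (hx : x ≠ []) :
    aLoopA (x :: L) = x :: L := by
  cases L with
  | nil => rfl
  | cons y ys => simp [aLoopA, hx]

theorem aLoopA_nil_cons (L : List (List Char)) (hL : L ≠ []) :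
    aLoopA ([] :: L) = aLoopA L := by
  cases L with
  | nil => exact absurd rfl hL
  | cons y ys => simp [aLoopA]

theorem aLoopA_splitNl (s : List Char) :
    aLoopA (splitNl s) = splitNl (s.dropWhile (· == '\n')) := by
  induction s with
  | nil => simp [splitNl, aLoopA]
  | cons c r ih =>
    by_cases hc : c = '\n'
    · subst hc
      rw [show splitNl ('\n' :: r) = [] :: splitNl r by simp [splitNl]]
      rw [aLoopA_nil_cons _ (splitNl_ne_nil r), ih]
      simp [List.dropWhile]
    · simp only [splitNl, if_neg hc]
      cases h : splitNl r with
      | nil => exact absurd h (splitNl_ne_nil r)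
      | cons h0 t =>
        rw [aLoopA_cons_ne _ _ (by simp)]
        have hcb : (c == '\n') = false := by simp [hc]
        simp [List.dropWhile, hcb, splitNl, hc, h]

theorem isIn_singleton_mem (c : Char) (s : List Char) :
    PySem.Chars.isIn [c] s = true ↔ c ∈ s := by
  rw [PySem.Chars.isIn_iff_infix]
  constructor
  · intro h
    exact h.subset (by simp)
  · intro h
    obtain ⟨pre, post, hps⟩ := List.append_of_mem h
    exact ⟨pre, post, by simp [hps]⟩

theorem stage1_eq (s : List Char) :
    (if PySem.Chars.isIn ['\n'] s then
       if 1 < (aLoopA (PySem.Chars.splitOn s ['\n'])).length then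
         (aLoopA (PySem.Chars.splitOn s ['\n'])).headD [] ++ ['.', '.', '.']
       else (aLoopA (PySem.Chars.splitOn s ['\n'])).headD []
     else s)
    = (if (s.dropWhile (· == '\n')).any (· == '\n') then
         (s.dropWhile (· == '\n')).takeWhile (· != '\n') ++ ['.', '.', '.']
       else (s.dropWhile (· == '\n')).takeWhile (· != '\n')) := by
  by_cases hmem : '\n' ∈ s
  · rw [if_pos ((isIn_singleton_mem '\n' s).mpr hmem)]
    rw [splitOn_eq_splitNl, aLoopA_splitNl, splitNl_headD]
    by_cases ht : '\n' ∈ s.dropWhile (· == '\n')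
    · rw [if_pos ((splitNl_len _).mpr ht), if_pos (List.any_eq_true.mpr ⟨'\n', ht, by simp⟩)]
    · rw [if_neg (fun hlt => ht ((splitNl_len _).mp hlt)),
          if_neg (fun ha => ht (by
            obtain ⟨x, hx, hbx⟩ := List.any_eq_true.mp ha
            exact (beq_iff_eq.mp hbx) ▸ hx))]
  · rw [if_neg (fun h => hmem ((isIn_singleton_mem '\n' s).mp h))]
    have hall : ∀ x ∈ s, ¬ (x == '\n') = true := by
      intro x hx hbe
      exact hmem (by simpa using (beq_iff_eq.mp hbe ▸ hx))
    have hdrop : s.dropWhile (· == '\n') = s := by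
      cases s with
      | nil => rfl
      | cons c r =>
        have hcb : (c == '\n') = false := by
          have := hall c (by simp)
          simpa using this
        simp [List.dropWhile, hcb]
    rw [hdrop]
    rw [if_neg (by intro h; obtain ⟨x, hx, hbx⟩ := List.any_eq_true.mp h; exact hall x hx hbx)]
    rw [List.takeWhile_eq_self_iff.mpr (fun x hx => by simpa using fun h => hall x hx (by simp [h]))]

-- ===== VERDICT (by name: the statement is the Claim_ definition above) =====
theorem val_summary_py_spec : Claim_equal_val_summary_py := by
  intro val max_len _
  unfold Spec_val_summary_py val_summary_py val_summary_py_alt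
  dsimp only
  rw [stage1_eq]
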